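-- pv_equiv track=rewrite | github.com/alvesvaren/AoC-2021 | 01.py | calculate_larger
-- ===== SOURCE A (Python) =====
-- def calculate_larger(data):
--     count = 0
--     last_item = None
--     for item in data:
--         if last_item is not None and item > last_item:
--             count += 1
--         last_item = item
--     return count
-- ===== SOURCE B (Python) =====
-- def calculate_larger(data):
--     seq = list(data)
--
--     def go(lo, hi):
--         # number of positions i with lo < i < hi and seq[i] > seq[i - 1]
--         if hi - lo < 2:
--             return 0
--         mid = (lo + hi) // 2
--         return go(lo, mid) + go(mid, hi) + (1 if seq[mid] > seq[mid - 1] else 0)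
--
--     return go(0, len(seq))
-- ===== Notes on version B (the rewrite author's own statement) =====
-- stated objective: alternative
-- what changed: Replaces A's single left-to-right scan with a last_item sentinel by a divide-and-conquer recursion that splits the index range in half, counts rises in each half independently and adds the one boundary comparison seq[mid] > seq[mid-1]; correct because every adjacent rise lies in exactly one half or at the split point.
import Mathlib
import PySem

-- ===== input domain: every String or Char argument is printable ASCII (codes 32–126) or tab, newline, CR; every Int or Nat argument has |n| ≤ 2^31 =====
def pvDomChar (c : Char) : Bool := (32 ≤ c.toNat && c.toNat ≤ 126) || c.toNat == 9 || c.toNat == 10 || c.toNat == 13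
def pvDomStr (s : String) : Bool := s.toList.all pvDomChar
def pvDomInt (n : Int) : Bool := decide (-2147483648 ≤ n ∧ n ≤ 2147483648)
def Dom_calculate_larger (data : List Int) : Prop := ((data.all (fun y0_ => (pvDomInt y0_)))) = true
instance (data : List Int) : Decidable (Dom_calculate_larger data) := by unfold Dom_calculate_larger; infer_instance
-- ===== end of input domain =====

-- B counts rises by divide-and-conquer on the index range (halves + one boundary comparison) instead of A's sentinel scan; alternative decomposition, same cost.


-- ===== PORT A =====
-- literal port of A's loop: state (count, last_item : Option Int)
def calculate_larger (data : List Int) : Int :=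
  (data.foldl
    (fun (st : Int × Option Int) item =>
      (match st.2 with
       | some last => if item > last then st.1 + 1 else st.1
       | none => st.1,
       some item))
    (0, none)).1

-- ===== PORT B =====
-- literal port of B's recursive helper go(lo, hi); the indices mid, mid-1 are
-- always in range (lo < mid < hi ≤ len seq) and nonnegative, so plain getD is
-- exact for Python's seq[mid] / seq[mid-1].
def goB (seq : List Int) (lo hi : Nat) : Int :=
  if hi - lo < 2 then 0
  else
    let mid := (lo + hi) / 2
    goB seq lo mid + goB seq mid hi +
      (if seq.getD mid 0 > seq.getD (mid - 1) 0 then 1 else 0)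
termination_by hi - lo
decreasing_by all_goals omega

def calculate_larger_alt (data : List Int) : Int :=
  goB data 0 data.length

-- ===== PRECONDITION & SPEC =====
def Spec_calculate_larger (data : List Int) (out : Int) : Prop := out = calculate_larger_alt data
instance (data : List Int) (out : Int) : Decidable (Spec_calculate_larger data out) := by unfold Spec_calculate_larger; infer_instance

-- ===== CLAIM (what is proved, stated in full; the proofs are below) =====
def Claim_equal_calculate_larger : Prop := ∀ (data : List Int), Dom_calculate_larger data → Spec_calculate_larger data (calculate_larger data)

-- ===== LEMMAS AND PROOFS =====

-- index-based count of rises strictly inside (lo, hi)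
def idxCnt (seq : List Int) (lo hi : Nat) : Int :=
  ((List.range' (lo + 1) (hi - lo - 1)).map
    (fun i => if seq.getD i 0 > seq.getD (i - 1) 0 then (1 : Int) else 0)).sum

theorem goB_eq_idxCnt (seq : List Int) : ∀ (n lo hi : Nat), hi - lo ≤ n →
    goB seq lo hi = idxCnt seq lo hi := by
  intro n
  induction n with
  | zero =>
      intro lo hi h
      rw [goB]
      simp only [if_pos (by omega : hi - lo < 2)]
      unfold idxCnt
      have : hi - lo - 1 = 0 := by omega
      simp [this]
  | succ n ih =>
      intro lo hi h
      rw [goB]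
      by_cases hsmall : hi - lo < 2
      · simp only [if_pos hsmall]
        unfold idxCnt
        have : hi - lo - 1 = 0 := by omega
        simp [this]
      · simp only [if_neg hsmall]
        set mid := (lo + hi) / 2 with hmid
        have h1 : lo < mid := by omega
        have h2 : mid < hi := by omega
        rw [ih lo mid (by omega), ih mid hi (by omega)]
        unfold idxCnt
        have hsplit : List.range' (lo + 1) (hi - lo - 1)
            = List.range' (lo + 1) (mid - lo - 1) ++ List.range' mid (hi - mid) := by
          have hap := @List.range'_append (lo + 1) (mid - lo - 1) (hi - mid) 1
          have e2 : (lo + 1) + 1 * (mid - lo - 1) = mid := by omega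
          rw [e2] at hap
          rw [hap]
          congr 1
          omega
        have hcons : List.range' mid (hi - mid)
            = mid :: List.range' (mid + 1) (hi - mid - 1) := by
          have e : hi - mid = (hi - mid - 1) + 1 := by omega
          conv_lhs => rw [e]
          rw [List.range'_succ]
        rw [hsplit, hcons]
        simp only [List.map_append, List.sum_append, List.map_cons, List.sum_cons]
        ring

-- A's result equals the structural adjacent-rise count
def cnt : List Int → Int
  | x :: y :: t => (if y > x then (1 : Int) else 0) + cnt (y :: t)
  | _ => 0

theorem calculate_larger_aux (l : List Int) :
    ∀ (x c : Int),
      (l.foldl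
        (fun (st : Int × Option Int) item =>
          (match st.2 with
           | some last => if item > last then st.1 + 1 else st.1
           | none => st.1,
           some item))
        (c, some x)).1
      = c + cnt (x :: l) := by
  induction l with
  | nil => intro x c; simp [cnt]
  | cons y t ih =>
      intro x c
      simp only [List.foldl_cons]
      rw [ih y]
      show _ = c + cnt (x :: y :: t)
      rw [cnt]
      split_ifs <;> ring

theorem cnt_eq_idxCnt : ∀ (l : List Int), cnt l = idxCnt l 0 l.length := by
  intro l
  match l with
  | [] => simp [cnt, idxCnt]
  | [x] => simp [cnt, idxCnt]
  | x :: y :: t =>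
      rw [cnt, cnt_eq_idxCnt (y :: t)]
      unfold idxCnt
      have e1 : (y :: t).length - 0 - 1 = t.length := by simp
      have e2 : (x :: y :: t).length - 0 - 1 = t.length + 1 := by simp
      rw [e1, e2, List.range'_succ]
      simp only [List.map_cons, List.sum_cons]
      congr 1
      have hmap : List.range' 2 t.length
          = List.map (fun i => i + 1) (List.range' 1 t.length) := by
        rw [List.range'_eq_map_range, List.range'_eq_map_range, List.map_map]
        congr 1
        funext i
        simp [Function.comp]
        omega
      rw [hmap, List.map_map]
      congr 1
      apply List.map_congr_left
      intro i hi
      have h1i : 1 ≤ i := by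
        have := (List.mem_range'_1.mp hi).1
        omega
      obtain ⟨j, rfl⟩ : ∃ j, i = j + 1 := ⟨i - 1, by omega⟩
      simp [List.getD]

-- ===== VERDICT (by name: the statement is the Claim_ definition above) =====
theorem calculate_larger_spec : Claim_equal_calculate_larger := by
  intro data _
  show calculate_larger data = calculate_larger_alt data
  have hB : calculate_larger_alt data = idxCnt data 0 data.length := by
    unfold calculate_larger_alt
    exact goB_eq_idxCnt data data.length 0 data.length (by omega)
  rw [hB, ← cnt_eq_idxCnt]
  cases data with
  | nil => rfl
  | cons x l =>
      unfold calculate_larger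
      simp only [List.foldl_cons]
      rw [calculate_larger_aux l x 0]
      ring
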